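-- pv_equiv track=rewrite | github.com/infinite0x20/carmina | src/carmina/alliteration.py | find_allit
-- ===== SOURCE A (Python) =====
-- def proximity_score(list, a, b):
--     '''
--     a and b are two strings that both occur in list. This function
--     returns the absolute difference in indices between these two strings.
--     '''
--     sublist = list[list.index(a):]
--     score = sublist.index(b)
--     return score
--
-- def find_allit(line, letter_counts, word_tracker, proximity=4):
--     '''
--     Uses the proximity counter to search for proper alliterations.
--     We define a "proper" alliteration in this case to be one in which
--     no two consecutive words are greater than the given proximity
--     distance from each other
--     '''
--     pairs = len(line) - 1
--     allit_pairs = 0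
--
--     for letter in letter_counts.keys():
--         if letter_counts[letter] >= 2:
--             count = letter_counts[letter]
--             words = word_tracker[letter]
--             for i in range(0, count - 1, 1):
--                 subset = line[i:]
--                 score = proximity_score(subset, words[i], words[i+1])
--
--                 if score <= proximity:
--                     allit_pairs += 1
--
--     return allit_pairs, pairs
-- ===== SOURCE B (Python) =====
-- import bisect
--
-- def find_allit(line, letter_counts, word_tracker, proximity=4):
--     pairs = len(line) - 1
--     positions = {}
--     for idx, word in enumerate(line):
--         positions.setdefault(word, []).append(idx)
--
--     allit_pairs = 0
--     for letter in letter_counts.keys():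
--         count = letter_counts[letter]
--         if count >= 2:
--             words = word_tracker[letter]
--             for i in range(count - 1):
--                 pa = positions[words[i]]
--                 ja = pa[bisect.bisect_left(pa, i)]
--                 pb = positions[words[i + 1]]
--                 kb = pb[bisect.bisect_left(pb, ja)]
--                 if kb - ja <= proximity:
--                     allit_pairs += 1
--     return allit_pairs, pairs
-- ===== Notes on version B (the rewrite author's own statement) =====
-- stated objective: alternative
-- what changed: Replaces A's per-pair list slicing and linear .index scans with a one-pass precomputed word->occurrence-index table queried by bisect.
import Mathlib
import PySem

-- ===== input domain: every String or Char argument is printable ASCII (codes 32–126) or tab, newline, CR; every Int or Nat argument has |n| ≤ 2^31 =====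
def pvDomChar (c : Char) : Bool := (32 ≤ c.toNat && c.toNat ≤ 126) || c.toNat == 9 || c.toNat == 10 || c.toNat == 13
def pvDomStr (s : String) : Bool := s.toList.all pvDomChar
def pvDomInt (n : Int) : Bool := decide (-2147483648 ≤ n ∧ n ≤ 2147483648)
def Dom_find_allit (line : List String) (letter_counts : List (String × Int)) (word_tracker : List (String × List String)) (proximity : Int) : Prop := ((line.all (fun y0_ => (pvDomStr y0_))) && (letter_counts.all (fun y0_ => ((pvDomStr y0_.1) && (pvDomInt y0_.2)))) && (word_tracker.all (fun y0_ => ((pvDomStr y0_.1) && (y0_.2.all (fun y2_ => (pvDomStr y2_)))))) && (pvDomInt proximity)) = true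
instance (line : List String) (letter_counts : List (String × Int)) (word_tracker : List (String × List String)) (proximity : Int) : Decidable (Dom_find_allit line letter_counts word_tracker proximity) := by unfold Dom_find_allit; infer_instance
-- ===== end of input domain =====

-- B replaces A's per-pair list slicing + linear .index scans by a precomputed
-- word -> occurrence-index table queried with bisect (objective: alternative algorithm).

-- ===== PORT A =====
-- proximity_score(list, a, b): returns none exactly where Python raises ValueError
def proximity_score (l : List String) (a b : String) : Option Int :=
  match PySem.List.index? l a with
  | none => none
  | some ia =>
    match PySem.List.index? (PySem.List.slice l (some (ia : Int)) none) b with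
    | none => none
    | some s => some (s : Int)

def find_allit (line : List String) (letter_counts : List (String × Int)) (word_tracker : List (String × List String)) (proximity : Int) : Int × Int :=
  let lcd := PySem.Dict.ofList letter_counts
  let wtd := PySem.Dict.ofList word_tracker
  let pairs : Int := PySem.List.len line - 1
  let allit_pairs : Int :=
    lcd.keys.foldl (fun acc letter =>
      if lcd.getD letter 0 ≥ 2 then
        let count := lcd.getD letter 0
        let words := wtd.getD letter []   -- KeyError (missing letter) → excluded by Pre_
        (PySem.List.pyRange 0 (count - 1) 1).foldl (fun acc i =>
          let subset := PySem.List.slice line (some i) none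
          -- words[i], words[i+1]: IndexError → excluded by Pre_
          match proximity_score subset (PySem.List.pyGetD words i "") (PySem.List.pyGetD words (i + 1) "") with
          | some score => if score ≤ proximity then acc + 1 else acc
          | none => acc) acc
      else acc) 0
  (allit_pairs, pairs)

-- ===== PORT B =====
-- positions table: for idx, word in enumerate(line): positions.setdefault(word, []).append(idx)
def allit_positions (line : List String) : PySem.Dict String (List Int) :=
  ((PySem.List.enumerate line 0).map (fun p => (p.2, p.1))).foldl
    (fun d p => d.modify p.1 [] (· ++ [p.2])) PySem.Dict.empty

def find_allit_alt (line : List String) (letter_counts : List (String × Int)) (word_tracker : List (String × List String)) (proximity : Int) : Int × Int :=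
  let lcd := PySem.Dict.ofList letter_counts
  let wtd := PySem.Dict.ofList word_tracker
  let pairs : Int := PySem.List.len line - 1
  let positions := allit_positions line
  let allit_pairs : Int :=
    lcd.keys.foldl (fun acc letter =>
      let count := lcd.getD letter 0
      if count ≥ 2 then
        let words := wtd.getD letter []   -- KeyError → excluded by Pre_
        (PySem.List.pyRange 0 (count - 1) 1).foldl (fun acc i =>
          let pa := positions.getD (PySem.List.pyGetD words i "") []
          let ja := PySem.List.pyGetD pa ((PySem.List.bisectLeft pa i : Nat) : Int) 0  -- IndexError → excluded by Pre_
          let pb := positions.getD (PySem.List.pyGetD words (i + 1) "") []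
          let kb := PySem.List.pyGetD pb ((PySem.List.bisectLeft pb ja : Nat) : Int) 0
          if kb - ja ≤ proximity then acc + 1 else acc) acc
      else acc) 0
  (allit_pairs, pairs)

-- ===== PRECONDITION & SPEC =====
-- Pre_: exactly the inputs on which Python A returns (no KeyError / IndexError / ValueError):
-- for every letter with count >= 2, word_tracker has that letter, its word list has at
-- least `count` entries, and for each consecutive pair (words[i], words[i+1]) there are
-- positions i ≤ j ≤ k in line holding words[i] at j and words[i+1] at k.
def Pre_find_allit (line : List String) (letter_counts : List (String × Int)) (word_tracker : List (String × List String)) (proximity : Int) : Prop :=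
  ∀ letter ∈ (PySem.Dict.ofList letter_counts).keys,
    2 ≤ (PySem.Dict.ofList letter_counts).getD letter 0 →
    ∃ ws, (PySem.Dict.ofList word_tracker).get? letter = some ws ∧
      (PySem.Dict.ofList letter_counts).getD letter 0 ≤ (ws.length : Int) ∧
      ∀ i : Nat, i < ((PySem.Dict.ofList letter_counts).getD letter 0 - 1).toNat →
        ∃ j : Nat, j < line.length ∧ i ≤ j ∧ line.getD j "" = ws.getD i "" ∧
          ∃ k : Nat, k < line.length ∧ j ≤ k ∧ line.getD k "" = ws.getD (i + 1) ""

instance (line : List String) (letter_counts : List (String × Int)) (word_tracker : List (String × List String)) (proximity : Int) : Decidable (Pre_find_allit line letter_counts word_tracker proximity) := by unfold Pre_find_allit; infer_instance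

def pvWitness_find_allit : List String × (List (String × Int)) × (List (String × List String)) × Int :=
  (["aa", "ab"], [("a", 2)], [("a", ["aa", "ab"])], 4)

def Spec_find_allit (line : List String) (letter_counts : List (String × Int)) (word_tracker : List (String × List String)) (proximity : Int) (out : Int × Int) : Prop := out = find_allit_alt line letter_counts word_tracker proximity
instance (line : List String) (letter_counts : List (String × Int)) (word_tracker : List (String × List String)) (proximity : Int) (out : Int × Int) : Decidable (Spec_find_allit line letter_counts word_tracker proximity out) := by unfold Spec_find_allit; infer_instance

-- ===== CLAIM (what is proved, stated in full; the proofs are below) =====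
def Claim_equal_find_allit : Prop := ∀ (line : List String) (letter_counts : List (String × Int)) (word_tracker : List (String × List String)) (proximity : Int), Dom_find_allit line letter_counts word_tracker proximity → Pre_find_allit line letter_counts word_tracker proximity → Spec_find_allit line letter_counts word_tracker proximity (find_allit line letter_counts word_tracker proximity)

-- ===== LEMMAS AND PROOFS =====

-- occurrence-index list of w in line (what B's positions table stores under w)
def occList (line : List String) (w : String) : List Int :=
  ((((PySem.List.enumerate line 0).map (fun p => (p.2, p.1))).filter (fun p => p.1 == w)).map (·.2))

lemma positions_getD (line : List String) (w : String) :
    (allit_positions line).getD w [] = occList line w := by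
  unfold allit_positions occList
  rw [PySem.Dict.getD_foldl_modify_append]
  simp

lemma mem_occList {line : List String} {w : String} {e : Int} :
    e ∈ occList line w ↔ ∃ k : Nat, k < line.length ∧ e = (k : Int) ∧ line.getD k "" = w := by
  unfold occList
  simp only [List.mem_map, List.mem_filter, PySem.List.mem_enumerate_iff]
  constructor
  · rintro ⟨p, ⟨⟨q, ⟨k, hk, rfl⟩, rfl⟩, hw⟩, rfl⟩
    refine ⟨k, hk, by simp, ?_⟩
    rw [List.getD_eq_getElem _ _ hk]
    exact (beq_iff_eq).mp hw
  · rintro ⟨k, hk, rfl, hw⟩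
    have hgw : getElem line k hk = w := by
      rw [← hw, List.getD_eq_getElem _ _ hk]
    refine ⟨(getElem line k hk, (0 : Int) + k), ⟨⟨((0 : Int) + k, getElem line k hk), ⟨k, hk, rfl⟩, rfl⟩, ?_⟩, by simp⟩
    simp [hgw]

lemma occList_pairwise_lt (line : List String) (w : String) :
    (occList line w).Pairwise (· < ·) := by
  unfold occList
  rw [List.pairwise_map]
  refine List.Pairwise.filter _ ?_
  rw [List.pairwise_map]
  exact List.Pairwise.imp (fun h => h) (PySem.List.pairwise_lt_enumerate line 0)

-- first occurrence: nothing in [n, n+m) matches, and line.getD (n+m) = w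
lemma index?_drop_facts (line : List String) (w : String) (n m : Nat)
    (h : PySem.List.index? (line.drop n) w = some m) :
    n + m < line.length ∧ line.getD (n + m) "" = w ∧
      ∀ k : Nat, n ≤ k → k < n + m → line.getD k "" ≠ w := by
  obtain ⟨hm, hmw, hmin⟩ := PySem.List.getElem_of_index?_eq_some h
  have hlen : (line.drop n).length = line.length - n := List.length_drop
  have hnm : n + m < line.length := by omega
  refine ⟨hnm, ?_, ?_⟩
  · rw [List.getD_eq_getElem _ _ hnm, ← List.getElem_drop (h := hm)]
    exact hmw
  · intro k hnk hk hkw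
    have hkl : k - n < m := by omega
    have hkl2 : k - n < (line.drop n).length := by omega
    refine hmin (k - n) hkl ?_
    rw [List.getElem_drop, ← List.getD_eq_getElem line "" (by omega : n + (k - n) < line.length),
      (by omega : n + (k - n) = k)]
    exact hkw

-- the core bridge: B's bisect lookup of the positions table computes the absolute
-- index of the first occurrence of w at or after n, i.e. n + subset.index(w).
lemma occ_bisect (line : List String) (w : String) (n m : Nat)
    (h : PySem.List.index? (line.drop n) w = some m) :
    PySem.List.pyGetD (occList line w) ((PySem.List.bisectLeft (occList line w) (n : Int) : Nat) : Int) 0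
      = ((n + m : Nat) : Int) := by
  obtain ⟨hnm, hw', hmin⟩ := index?_drop_facts line w n m h
  have hsortlt := occList_pairwise_lt line w
  have hsorted : (occList line w).Pairwise (· ≤ ·) := hsortlt.imp le_of_lt
  obtain ⟨ht_le, ht_lt, ht_ge⟩ := PySem.List.bisectLeft_spec (occList line w) (n : Int) hsorted
  have hmem : ((n + m : Nat) : Int) ∈ occList line w := mem_occList.mpr ⟨n + m, hnm, rfl, hw'⟩
  obtain ⟨q, hq, hocq⟩ := List.getElem_of_mem hmem
  have htq : PySem.List.bisectLeft (occList line w) (n : Int) = q := by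
    by_contra hne
    rcases Nat.lt_or_ge q (PySem.List.bisectLeft (occList line w) (n : Int)) with hlt | hge
    · have hc := ht_lt q hq hlt
      rw [hocq] at hc
      have : ((n + m : Nat) : Int) < (n : Int) := hc
      push_cast at this; omega
    · have hq' : PySem.List.bisectLeft (occList line w) (n : Int) < q :=
        lt_of_le_of_ne hge hne
      have htlen : PySem.List.bisectLeft (occList line w) (n : Int) < (occList line w).length :=
        lt_trans hq' hq
      have h1 := ht_ge _ htlen le_rfl
      have h2 := List.pairwise_iff_getElem.mp hsortlt _ q htlen hq hq'
      rw [hocq] at h2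
      obtain ⟨k, hk, he, hkw⟩ := mem_occList.mp (List.getElem_mem htlen)
      rw [he] at h1 h2
      have hk1 : n ≤ k := by exact_mod_cast h1
      have hk2 : k < n + m := by exact_mod_cast h2
      exact hmin k hk1 hk2 hkw
  have htlen : PySem.List.bisectLeft (occList line w) (n : Int) < (occList line w).length :=
    htq ▸ hq
  rw [PySem.List.pyGetD_natCast, List.getD_eq_getElem _ _ htlen]
  subst htq
  exact hocq

-- the two loop bodies agree on every pair index i admitted by Pre_'s witness data
theorem find_allit_spec_step (line : List String) (proximity : Int) (ws : List String)
    (n : Nat)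
    (H : ∃ j : Nat, j < line.length ∧ n ≤ j ∧ line.getD j "" = ws.getD n "" ∧
      ∃ k : Nat, k < line.length ∧ j ≤ k ∧ line.getD k "" = ws.getD (n + 1) "") (acc2 : Int) :
    (match proximity_score (PySem.List.slice line (some ((n : Nat) : Int)) none)
        (PySem.List.pyGetD ws ((n : Nat) : Int) "") (PySem.List.pyGetD ws (((n : Nat) : Int) + 1) "") with
      | some score => if score ≤ proximity then acc2 + 1 else acc2
      | none => acc2) =
    (let positions := allit_positions line
     let pa := positions.getD (PySem.List.pyGetD ws ((n : Nat) : Int) "") []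
     let ja := PySem.List.pyGetD pa ((PySem.List.bisectLeft pa ((n : Nat) : Int) : Nat) : Int) 0
     let pb := positions.getD (PySem.List.pyGetD ws (((n : Nat) : Int) + 1) "") []
     let kb := PySem.List.pyGetD pb ((PySem.List.bisectLeft pb ja : Nat) : Int) 0
     if kb - ja ≤ proximity then acc2 + 1 else acc2) := by
  obtain ⟨j, hjlt, hij, hja, k, hklt, hjk, hkb⟩ := H
  have hn1 : ((n : Nat) : Int) + 1 = ((n + 1 : Nat) : Int) := by push_cast; ring
  rw [hn1, PySem.List.pyGetD_natCast, PySem.List.pyGetD_natCast,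
    PySem.List.slice_from line (Int.natCast_nonneg n), Int.toNat_natCast]
  have hmema : ws.getD n "" ∈ line.drop n := by
    have hj2 : j - n < (line.drop n).length := by simp [List.length_drop]; omega
    have hm := List.getElem_mem hj2
    rwa [List.getElem_drop, ← List.getD_eq_getElem line "" (by omega),
      (by omega : n + (j - n) = j), hja] at hm
  obtain ⟨ia, hia⟩ := Option.isSome_iff_exists.mp ((PySem.List.index?_isSome_iff _ _).mpr hmema)
  obtain ⟨hiaL, hiaw, hiamin⟩ := PySem.List.getElem_of_index?_eq_some hia
  have hnia_le_j : n + ia ≤ j := by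
    by_contra hlt
    have hjn : j - n < ia := by omega
    refine hiamin (j - n) hjn ?_
    rw [List.getElem_drop, ← List.getD_eq_getElem line "" (by omega),
      (by omega : n + (j - n) = j)]
    exact hja
  have hmemb : ws.getD (n + 1) "" ∈ line.drop (n + ia) := by
    have hk2 : k - (n + ia) < (line.drop (n + ia)).length := by simp [List.length_drop]; omega
    have hm := List.getElem_mem hk2
    rwa [List.getElem_drop, ← List.getD_eq_getElem line "" (by omega),
      (by omega : (n + ia) + (k - (n + ia)) = k), hkb] at hm
  obtain ⟨ib, hib⟩ := Option.isSome_iff_exists.mp ((PySem.List.index?_isSome_iff _ _).mpr hmemb)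
  have hA : proximity_score (line.drop n) (ws.getD n "") (ws.getD (n + 1) "") = some (ib : Int) := by
    have hslice : PySem.List.slice (List.drop n line) (some ((ia : Nat) : Int)) none = List.drop (n + ia) line := by
      rw [PySem.List.slice_from _ (Int.natCast_nonneg ia), Int.toNat_natCast, List.drop_drop]
    simp only [proximity_score, hia, hslice, hib]
  rw [hA]
  have hba := occ_bisect line (ws.getD n "") n ia hia
  have hbb := occ_bisect line (ws.getD (n + 1) "") (n + ia) ib hib
  simp only [positions_getD]
  rw [hba, hbb]
  have hcast : ((n + ia + ib : Nat) : Int) - ((n + ia : Nat) : Int) = (ib : Int) := by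
    push_cast; ring
  rw [hcast]

-- ===== VERDICT (by name: the statement is the Claim_ definition above) =====
theorem find_allit_spec : Claim_equal_find_allit := by
  intro line letter_counts word_tracker proximity _hdom hpre
  unfold Spec_find_allit
  simp only [find_allit, find_allit_alt, Prod.mk.injEq]
  refine ⟨?_, trivial⟩
  apply PySem.List.foldl_congr_mem'
  intro letter hmemk acc
  by_cases hc : (PySem.Dict.ofList letter_counts).getD letter 0 ≥ 2
  · rw [if_pos hc, if_pos hc]
    obtain ⟨ws, hws, hlen, hinner⟩ := hpre letter hmemk hc
    rw [PySem.Dict.getD_of_get?_eq_some _ ([]) hws]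
    apply PySem.List.foldl_congr_mem'
    intro i hi acc2
    obtain ⟨hi0, hi1⟩ := PySem.List.mem_pyRange_one.mp hi
    obtain ⟨n, rfl⟩ : ∃ n : Nat, i = (n : Int) := ⟨i.toNat, (Int.toNat_of_nonneg hi0).symm⟩
    have hnlt : n < ((PySem.Dict.ofList letter_counts).getD letter 0 - 1).toNat := by omega
    exact find_allit_spec_step line proximity ws n (hinner n hnlt) acc2
  · rw [if_neg hc, if_neg hc]
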